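-- pv_equiv track=rewrite | github.com/Social-sale386/Hikvision-iSecureFucker | isecure_tool/signer.py | _canonical_resource
-- ===== SOURCE A (Python) =====
-- from typing import Any, Dict, Iterable, List, Tuple
--
-- def _canonical_resource(path: str, query_items: Iterable[Tuple[str, str]]) -> str:
--     if not query_items:
--         return path
--     first_values: Dict[str, str] = {}
--     for key, value in query_items:
--         key_str = str(key)
--         if key_str in first_values:
--             continue
--         if value is None:
--             first_values[key_str] = ""
--         else:
--             first_values[key_str] = str(value)
--     parts: List[str] = []
--     for key in sorted(first_values.keys()):
--         value = first_values[key]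
--         if value == "":
--             parts.append(key)
--         else:
--             parts.append(f"{key}={value}")
--     return f"{path}?{'&'.join(parts)}"
-- ===== SOURCE B (Python) =====
-- def _canonical_resource(path, query_items):
--     if not query_items:
--         return path
--     items = [(str(k), "" if v is None else str(v)) for k, v in query_items]
--     parts = []
--     while items:
--         k = min(kk for kk, _ in items)
--         v = next(vv for kk, vv in items if kk == k)
--         parts.append(k if v == "" else f"{k}={v}")
--         items = [(kk, vv) for kk, vv in items if kk != k]
--     return f"{path}?{'&'.join(parts)}"
-- ===== Notes on version B (the rewrite author's own statement) =====
-- stated objective: alternative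
-- what changed: Replaces A's first-wins dict build followed by sorting the dict's keys with a selection loop that uses no dict and no sort: repeatedly extract the minimal remaining key, emit its first value, and filter out all items with that key until none remain.
import Mathlib
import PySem

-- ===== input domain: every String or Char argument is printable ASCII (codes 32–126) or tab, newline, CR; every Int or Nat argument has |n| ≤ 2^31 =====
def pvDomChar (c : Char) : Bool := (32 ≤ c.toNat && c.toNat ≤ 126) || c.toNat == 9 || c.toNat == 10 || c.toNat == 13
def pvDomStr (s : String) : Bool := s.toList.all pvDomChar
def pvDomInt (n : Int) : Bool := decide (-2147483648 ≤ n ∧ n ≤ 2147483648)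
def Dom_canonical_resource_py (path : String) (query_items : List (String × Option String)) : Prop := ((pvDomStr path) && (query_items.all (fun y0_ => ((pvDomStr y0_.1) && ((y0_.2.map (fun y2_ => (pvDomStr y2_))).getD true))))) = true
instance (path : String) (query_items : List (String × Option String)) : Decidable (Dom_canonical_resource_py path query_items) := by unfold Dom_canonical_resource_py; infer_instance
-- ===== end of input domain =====

-- B replaces A's first-wins dict build plus key sort with a selection loop (no dict, no
-- sort call): repeatedly extract the minimal remaining key and filter it out (no speed claim).

-- ===== PORT A =====
-- Port of _canonical_resource: build the first-value dict, then emit sorted keys.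
-- (str(key)/str(value) on arguments that are already str are the identity and are ported as such.)
def canonical_resource_py (path : String) (query_items : List (String × Option String)) : String :=
  if query_items.isEmpty then path
  else
    let first_values : PySem.Dict String String :=
      query_items.foldl (fun d kv =>
        let key_str := kv.1
        if d.contains key_str then d
        else
          match kv.2 with
          | none => d.insert key_str ""
          | some v => d.insert key_str v) PySem.Dict.empty
    let parts : List String :=
      (PySem.List.sorted first_values.keys (fun k => k) false).foldl (fun parts key =>
        let value := first_values.getD key ""
        if value = "" then parts ++ [key] else parts ++ [key ++ "=" ++ value]) []
    path ++ "?" ++ PySem.Str.join "&" parts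

-- ===== PORT B =====
-- B's while loop: emit the minimal remaining key with its first value, drop all items
-- with that key, repeat. `next(...)` always matches (k is a key of items), ported with
-- an unreachable "" default; min(...) is the running fold Python's min performs.
def pvSelect (items : List (String × String)) : List String :=
  match items with
  | [] => []
  | e :: t =>
    let k := (t.map Prod.fst).foldl min e.1
    let v := match (e :: t).find? (fun x => x.1 == k) with
             | some x => x.2
             | none => ""   -- unreachable: k is the key of some item
    let rest := (e :: t).filter (fun x => !(x.1 == k))
    (if v = "" then k else k ++ "=" ++ v) :: pvSelect rest
termination_by items.length
decreasing_by
  simp only [List.length_cons]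
  have hk : (t.map Prod.fst).foldl min e.1 = e.1 ∨ (t.map Prod.fst).foldl min e.1 ∈ t.map Prod.fst :=
    PySem.List.foldl_min_mem (t.map Prod.fst) e.1
  apply List.length_filter_lt_length_iff_exists.mpr
  rcases hk with hk | hk
  · exact ⟨e, by simp, by simp [List.attach_map_val, hk]⟩
  · rcases List.mem_map.mp hk with ⟨x, hx, hxk⟩
    exact ⟨x, by simp [hx], by simp [List.attach_map_val, hxk]⟩

def canonical_resource_py_alt (path : String) (query_items : List (String × Option String)) : String :=
  if query_items.isEmpty then path
  else
    let items : List (String × String) :=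
      query_items.map (fun kv => (kv.1, match kv.2 with | none => "" | some v => v))
    path ++ "?" ++ PySem.Str.join "&" (pvSelect items)

-- ===== PRECONDITION & SPEC =====
def Spec_canonical_resource_py (path : String) (query_items : List (String × Option String)) (out : String) : Prop := out = canonical_resource_py_alt path query_items
instance (path : String) (query_items : List (String × Option String)) (out : String) : Decidable (Spec_canonical_resource_py path query_items out) := by unfold Spec_canonical_resource_py; infer_instance

-- ===== CLAIM (what is proved, stated in full; the proofs are below) =====
def Claim_equal_canonical_resource_py : Prop := ∀ (path : String) (query_items : List (String × Option String)), Dom_canonical_resource_py path query_items → Spec_canonical_resource_py path query_items (canonical_resource_py path query_items)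

-- ===== LEMMAS AND PROOFS =====

-- A's dict-building loop, abstracted over the accumulator dict.
def pvBuildA (l : List (String × Option String)) (d : PySem.Dict String String) :
    PySem.Dict String String :=
  l.foldl (fun d kv =>
    if d.contains kv.1 then d
    else
      match kv.2 with
      | none => d.insert kv.1 ""
      | some v => d.insert kv.1 v) d

-- the value A stores for a key: None ↦ "", some v ↦ v
def pvNorm (v : Option String) : String := match v with | none => "" | some s => s

-- the part emitted for key k: its first value in items, "" ↦ bare key
def pvEmit (items : List (String × String)) (k : String) : String :=
  match items.find? (fun e => e.1 == k) with
  | some e => if e.2 = "" then k else k ++ "=" ++ e.2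
  | none => ""

lemma pvBuildA_cons (e : String × Option String) (t : List (String × Option String))
    (d : PySem.Dict String String) :
    pvBuildA (e :: t) d =
      pvBuildA t (if d.contains e.1 then d else d.insert e.1 (pvNorm e.2)) := by
  cases e with
  | mk k v =>
    cases v <;> simp [pvBuildA, pvNorm]

-- lookup in the finished dict = first matching item, normalized
lemma pvBuildA_get? (l : List (String × Option String)) (d : PySem.Dict String String) (k : String)
    (hnd : d.keys.Nodup) :
    (pvBuildA l d).get? k =
      ((d.get? k).or ((l.find? (fun e => e.1 == k)).map (fun e => pvNorm e.2))) := by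
  induction l generalizing d with
  | nil => simp [pvBuildA]
  | cons e t ih =>
    rw [pvBuildA_cons]
    by_cases hc : d.contains e.1 = true
    · rw [if_pos hc, ih d hnd]
      by_cases hek : e.1 = k
      · have hsome : (d.get? k).isSome := by
          rw [← hek]
          rw [PySem.Dict.contains_eq_isSome_get?] at hc
          exact hc
        rcases Option.isSome_iff_exists.mp hsome with ⟨v, hv⟩
        simp [hv]
      · simp [hek]
    · rw [if_neg hc]
      have hnd' : (d.insert e.1 (pvNorm e.2)).keys.Nodup := PySem.Dict.nodup_keys_insert d _ _ hnd
      rw [ih _ hnd']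
      by_cases hek : e.1 = k
      · subst hek
        have hdk : d.get? e.1 = none := by
          rw [PySem.Dict.contains_eq_isSome_get?] at hc
          simpa using hc
        simp [PySem.Dict.get?_insert_self, hdk]
      · rw [PySem.Dict.get?_insert_of_ne d _ (fun h => hek h.symm)]
        simp [hek]

-- keys of the finished dict = the seen set updated with the item keys, in first-occurrence order
lemma pvBuildA_keys (l : List (String × Option String)) (d : PySem.Dict String String) :
    (pvBuildA l d).keys = PySem.Set.update d.keys (l.map (fun e => e.1)) := by
  induction l generalizing d with
  | nil => simp [pvBuildA, PySem.Set.update]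
  | cons e t ih =>
    rw [pvBuildA_cons]
    have hup : ∀ (s : PySem.Set String) (x : String) (xs : List String),
        PySem.Set.update s (x :: xs) = PySem.Set.update (PySem.Set.add s x) xs := fun _ _ _ => rfl
    by_cases hc : d.contains e.1 = true
    · have hmem : e.1 ∈ d.keys := (PySem.Dict.contains_iff_mem_keys d e.1).mp hc
      rw [if_pos hc, ih d, List.map_cons, hup]
      have : PySem.Set.add d.keys e.1 = d.keys := by
        simp [PySem.Set.add, hmem]
      rw [this]
    · have hmem : e.1 ∉ d.keys := fun h => hc ((PySem.Dict.contains_iff_mem_keys d e.1).mpr h)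
      rw [if_neg hc, ih _, List.map_cons, hup,
        PySem.Dict.keys_insert_of_not_contains d _ (by simpa using hc)]
      have : PySem.Set.add d.keys e.1 = d.keys ++ [e.1] := by
        simp [PySem.Set.add, hmem]
      rw [this]

-- A's emit loop is a map
lemma pvEmitFold (ks : List String) (d : PySem.Dict String String) (acc : List String) :
    ks.foldl (fun parts key =>
        let value := d.getD key ""
        if value = "" then parts ++ [key] else parts ++ [key ++ "=" ++ value]) acc
      = acc ++ ks.map (fun key =>
          if d.getD key "" = "" then key else key ++ "=" ++ d.getD key "") := by
  induction ks generalizing acc with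
  | nil => simp
  | cons k t ih =>
    simp only [List.foldl_cons, List.map_cons]
    rw [ih]
    by_cases h : d.getD k "" = "" <;> simp [h]

-- filtering out key k0 does not change the first match for any other key
lemma pvFind_filter (l : List (String × String)) (k0 k : String) (hne : k ≠ k0) :
    (l.filter (fun x => !(x.1 == k0))).find? (fun x => x.1 == k)
      = l.find? (fun x => x.1 == k) := by
  induction l with
  | nil => simp
  | cons e t ih =>
    have hne' : (k0 == k) = false := by
      simp only [beq_eq_false_iff_ne]; exact fun h => hne h.symm
    by_cases h0 : e.1 = k0
    · simp [h0, hne', ih]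
    · by_cases hk : e.1 = k
      · simp [hk, hne]
      · simp [h0, hk, ih]

-- one unfolding step of B's loop, with the always-some find? folded into pvEmit
lemma pvSelect_cons (e : String × String) (t : List (String × String)) :
    pvSelect (e :: t) =
      pvEmit (e :: t) ((t.map Prod.fst).foldl min e.1)
        :: pvSelect ((e :: t).filter (fun x => !(x.1 == (t.map Prod.fst).foldl min e.1))) := by
  rw [pvSelect]
  have hkmem : (t.map Prod.fst).foldl min e.1 ∈ (e :: t).map Prod.fst := by
    rcases PySem.List.foldl_min_mem (t.map Prod.fst) e.1 with h | h
    · simp only [List.map_cons, List.mem_cons]; exact Or.inl h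
    · simp only [List.map_cons, List.mem_cons]; exact Or.inr h
  unfold pvEmit
  cases hf : (e :: t).find? (fun x => x.1 == (t.map Prod.fst).foldl min e.1) with
  | none =>
    exfalso
    rcases List.mem_map.mp hkmem with ⟨x, hx, hxk⟩
    have hp : (x.1 == (t.map Prod.fst).foldl min e.1) = true := by rw [hxk]; simp
    have : ((e :: t).find? (fun x => x.1 == (t.map Prod.fst).foldl min e.1)).isSome = true :=
      List.find?_isSome.mpr ⟨x, hx, hp⟩
    rw [hf] at this
    simp at this
  | some x => rfl

-- B's selection loop = the sorted distinct keys, each mapped to its emitted part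
lemma pvSelect_eq_aux (n : Nat) : ∀ items : List (String × String), items.length ≤ n →
    pvSelect items
      = (PySem.List.sorted (PySem.Set.ofList (items.map Prod.fst)) (fun k => k) false).map
          (pvEmit items) := by
  induction n with
  | zero =>
    intro items h
    cases items with
    | nil => simp [pvSelect, PySem.Set.ofList, PySem.List.sorted]
    | cons e t => simp at h
  | succ n ihn =>
    intro items h
    cases items with
    | nil => simp [pvSelect, PySem.Set.ofList, PySem.List.sorted]
    | cons e t =>
      rw [pvSelect_cons]
      set k := (t.map Prod.fst).foldl min e.1 with hkdef
      set rest := (e :: t).filter (fun x => !(x.1 == k)) with hrestdef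
      have hkmem : k ∈ (e :: t).map Prod.fst := by
        rcases PySem.List.foldl_min_mem (t.map Prod.fst) e.1 with hm | hm
        · simp only [List.map_cons, List.mem_cons]; exact Or.inl hm
        · simp only [List.map_cons, List.mem_cons]; exact Or.inr hm
      have hkle : ∀ y ∈ (e :: t).map Prod.fst, k ≤ y := by
        intro y hy
        rcases List.mem_cons.mp hy with hy | hy
        · exact hy ▸ (PySem.List.foldl_min_le (t.map Prod.fst) e.1).1
        · exact (PySem.List.foldl_min_le (t.map Prod.fst) e.1).2 y hy
      have hSne : PySem.Set.ofList ((e :: t).map Prod.fst) ≠ [] := by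
        intro hnil
        have hmem : k ∈ ([] : List String) := hnil ▸ (PySem.Set.mem_ofList _ k).mpr hkmem
        simp at hmem
      obtain ⟨k0, ks₂, hks⟩ :
          ∃ k0 ks₂, PySem.List.sorted (PySem.Set.ofList ((e :: t).map Prod.fst)) (fun x => x) false
            = k0 :: ks₂ := by
        cases hx : PySem.List.sorted (PySem.Set.ofList ((e :: t).map Prod.fst)) (fun x => x) false with
        | nil => exact absurd ((PySem.List.sorted_eq_nil_iff _ _ _).mp hx) (by simpa using hSne)
        | cons a b => exact ⟨a, b, rfl⟩
      have hk0 : k0 = k := by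
        have h1 : k0 ≤ k := PySem.List.key_head_sorted_le _ _ hks k ((PySem.Set.mem_ofList _ k).mpr hkmem)
        have h2 : k ≤ k0 := by
          have hk0mem : k0 ∈ PySem.Set.ofList ((e :: t).map Prod.fst) := by
            have : k0 ∈ PySem.List.sorted (PySem.Set.ofList ((e :: t).map Prod.fst)) (fun x => x) false := by
              rw [hks]; exact List.mem_cons_self
            exact (PySem.List.mem_sorted _ _ _ _).mp this
          exact hkle k0 ((PySem.Set.mem_ofList _ k0).mp hk0mem)
        exact le_antisymm h1 h2
      have hpw : (k0 :: ks₂).Pairwise (· < ·) := hks ▸ PySem.List.sorted_ofList_pairwise_lt _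
      -- tail of sorted keys = sorted keys of rest
      have htail : PySem.List.sorted (PySem.Set.ofList (rest.map Prod.fst)) (fun x => x) false = ks₂ := by
        apply PySem.List.sorted_eq_of_perm_of_pairwise_lt
        · apply (List.perm_ext_iff_of_nodup ((hpw.sublist (List.sublist_cons_self k0 ks₂)).imp
            (fun h => ne_of_lt h)) (PySem.Set.nodup_ofList _)).mpr
          intro y
          constructor
          · intro hy
            have hymem : y ∈ (k0 :: ks₂) := List.mem_cons_of_mem _ hy
            have hyS : y ∈ PySem.Set.ofList ((e :: t).map Prod.fst) :=
              (PySem.List.mem_sorted _ _ _ _).mp (hks ▸ hymem)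
            have hyk : y ≠ k := by
              have := (List.pairwise_cons.mp hpw).1 y hy
              exact hk0 ▸ Ne.symm (ne_of_lt this)
            apply (PySem.Set.mem_ofList _ _).mpr
            rcases List.mem_map.mp ((PySem.Set.mem_ofList _ _).mp hyS) with ⟨x, hx, hxy⟩
            exact List.mem_map.mpr ⟨x, List.mem_filter.mpr ⟨hx, by simp [hxy, hyk]⟩, hxy⟩
          · intro hy
            rcases List.mem_map.mp ((PySem.Set.mem_ofList _ _).mp hy) with ⟨x, hx, hxy⟩
            rcases List.mem_filter.mp hx with ⟨hxmem, hxne⟩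
            have hyk : y ≠ k := by
              intro hcontra; subst hxy; simp [hcontra] at hxne
            have hyS : y ∈ PySem.Set.ofList ((e :: t).map Prod.fst) :=
              (PySem.Set.mem_ofList _ _).mpr (List.mem_map.mpr ⟨x, hxmem, hxy⟩)
            have : y ∈ (k0 :: ks₂) := hks ▸ (PySem.List.mem_sorted _ _ _ _).mpr hyS
            rcases List.mem_cons.mp this with hcase | hcase
            · exact absurd (hcase.trans hk0) hyk
            · exact hcase
        · exact (List.pairwise_cons.mp hpw).2
      have hlen : rest.length ≤ n := by
        have hlt : rest.length < (e :: t).length := by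
          apply List.length_filter_lt_length_iff_exists.mpr
          rcases List.mem_map.mp hkmem with ⟨x, hx, hxk⟩
          exact ⟨x, hx, by simp [hxk]⟩
        have := Nat.lt_of_lt_of_le hlt h
        omega
      rw [hks, List.map_cons, ihn rest hlen, htail, hk0]
      congr 1
      apply List.map_congr_left
      intro y hy
      have hyk : y ≠ k := by
        have := (List.pairwise_cons.mp hpw).1 y hy
        exact hk0 ▸ Ne.symm (ne_of_lt this)
      unfold pvEmit
      rw [hrestdef, pvFind_filter _ k y hyk]

lemma pvSelect_eq (items : List (String × String)) :
    pvSelect items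
      = (PySem.List.sorted (PySem.Set.ofList (items.map Prod.fst)) (fun k => k) false).map
          (pvEmit items) := pvSelect_eq_aux items.length items le_rfl

-- ===== VERDICT (by name: the statement is the Claim_ definition above) =====
theorem canonical_resource_py_spec : Claim_equal_canonical_resource_py := by
  intro path qs _
  unfold Spec_canonical_resource_py
  unfold canonical_resource_py canonical_resource_py_alt
  by_cases hq : qs.isEmpty
  · simp [hq]
  · simp only [hq]
    congr 1
    congr 1
    congr 1
    -- the two parts lists coincide
    rw [show (qs.foldl (fun d kv =>
        if d.contains kv.1 then d
        else
          match kv.2 with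
          | none => d.insert kv.1 ""
          | some v => d.insert kv.1 v) PySem.Dict.empty) = pvBuildA qs PySem.Dict.empty from rfl]
    rw [pvEmitFold]
    have hitems : (qs.map (fun kv =>
        (kv.1, match kv.2 with | none => "" | some v => v))) = qs.map (fun kv => (kv.1, pvNorm kv.2)) := by
      simp [pvNorm]
    have hmapfst :
        ((qs.map (fun kv => (kv.1, pvNorm kv.2))).map Prod.fst) = qs.map (fun e => e.1) := by
      simp [List.map_map, Function.comp]
    have hkeys : (pvBuildA qs PySem.Dict.empty).keys
        = PySem.Set.ofList (qs.map (fun e => e.1)) := by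
      rw [pvBuildA_keys]
      simp [PySem.Set.update, PySem.Set.ofList, PySem.Dict.keys_empty]
    rw [hitems, pvSelect_eq, hmapfst, hkeys]
    simp only [List.nil_append]
    apply List.map_congr_left
    intro k hk
    have hkmem : k ∈ qs.map (fun e => e.1) := by
      have := (PySem.List.mem_sorted _ _ _ _).mp hk
      exact (PySem.Set.mem_ofList _ _).mp this
    have hfind : ∃ e0, qs.find? (fun e => e.1 == k) = some e0 := by
      rcases List.mem_map.mp hkmem with ⟨e, he, hek⟩
      have : (qs.find? (fun e => e.1 == k)).isSome := by
        apply List.find?_isSome.mpr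
        exact ⟨e, he, by simp [hek]⟩
      exact Option.isSome_iff_exists.mp this
    rcases hfind with ⟨e0, he0⟩
    have hga : (pvBuildA qs PySem.Dict.empty).getD k "" = pvNorm e0.2 := by
      rw [PySem.Dict.getD_eq_get?_getD,
        pvBuildA_get? qs PySem.Dict.empty k (PySem.Dict.nodup_keys_empty)]
      simp [he0]
    have hgb : ((qs.map (fun kv => (kv.1, pvNorm kv.2))).find? (fun e => e.1 == k))
        = some (e0.1, pvNorm e0.2) := by
      rw [List.find?_map]
      rw [show ((fun (e : String × String) => e.1 == k) ∘ (fun kv : String × Option String => (kv.1, pvNorm kv.2)))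
            = (fun e => e.1 == k) from rfl]
      simp [he0]
    unfold pvEmit
    rw [hgb]
    simp only [hga]
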